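-- pv_equiv track=rewrite | github.com/Vivek1461/Tnp-AI-Based-Personalized-learning-and-skill-gap-analyzer | backend/modules/resume_generator/generator.py | _filter_skills_for_role
-- ===== SOURCE A (Python) =====
-- from typing import Any, Dict, List, Optional
--
-- _ROLE_SKILL_MAP: Dict[str, List[str]] = {
--     "Data Analyst": [
--         "SQL", "Excel", "Python", "Data Visualization", "Statistics",
--         "Tableau", "Power BI", "Pandas", "NumPy",
--     ],
--     "Data Scientist": [
--         "Python", "Machine Learning", "Statistics", "SQL",
--         "Data Visualization", "Deep Learning", "Scikit-learn",
--         "TensorFlow", "Feature Engineering",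
--     ],
--     "ML Engineer": [
--         "Python", "Machine Learning", "Deep Learning", "TensorFlow",
--         "PyTorch", "Docker", "REST APIs", "SQL", "Statistics",
--         "Data Structures & Algorithms",
--     ],
--     "AI Engineer": [
--         "Python", "Deep Learning", "Machine Learning", "TensorFlow",
--         "PyTorch", "Statistics", "Linear Algebra", "REST APIs",
--     ],
--     "Software Engineer": [
--         "Python", "Data Structures & Algorithms", "SQL", "REST APIs",
--         "JavaScript", "System Design", "Git", "Docker",
--     ],
--     "Web Developer": [
--         "HTML", "CSS", "JavaScript", "React", "REST APIs", "Node.js",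
--     ],
--     "Full Stack Developer": [
--         "HTML", "CSS", "JavaScript", "React", "Node.js", "SQL",
--         "REST APIs", "Docker",
--     ],
--     "Java Backend Developer": [
--         "Java", "Spring Boot", "SQL", "REST APIs", "System Design",
--         "Docker", "Microservices",
--     ],
--     "DevOps Engineer": [
--         "Linux", "Docker", "Kubernetes", "CI/CD", "Cloud Platform",
--         "Shell Scripting", "Python",
--     ],
--     "Cloud Engineer": [
--         "Cloud Platform", "Docker", "Kubernetes", "Linux",
--         "Networking", "Terraform", "CI/CD",
--     ],
--     "Cybersecurity Analyst": [
--         "Networking", "Linux", "Python", "Security Tools",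
--         "Cryptography", "SQL",
--     ],
-- }
--
-- def _filter_skills_for_role(skills: List[str], target_role: str, required_skills: Optional[List[str]] = None) -> List[str]:
--     """Return skills ordered by role relevance — most important first."""
--     role_relevant = _ROLE_SKILL_MAP.get(target_role, [])
--     # Priority 1: in required_skills AND in role map
--     # Priority 2: in role map
--     # Priority 3: everything else
--     req_set = set(s.lower() for s in (required_skills or []))
--     role_set = set(s.lower() for s in role_relevant)
--     skill_lower = {s.lower(): s for s in skills}
--
--     tier1 = [skill_lower[k] for k in skill_lower if k in req_set and k in role_set]
--     tier2 = [skill_lower[k] for k in skill_lower if k in role_set and k not in req_set]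
--     tier3 = [skill_lower[k] for k in skill_lower if k not in role_set and k not in req_set]
--     return tier1 + tier2 + tier3
-- ===== SOURCE B (Python) =====
-- from typing import Dict, List, Optional
--
-- _ROLE_SKILL_MAP: Dict[str, List[str]] = {
--     "Data Analyst": [
--         "SQL", "Excel", "Python", "Data Visualization", "Statistics",
--         "Tableau", "Power BI", "Pandas", "NumPy",
--     ],
--     "Data Scientist": [
--         "Python", "Machine Learning", "Statistics", "SQL",
--         "Data Visualization", "Deep Learning", "Scikit-learn",
--         "TensorFlow", "Feature Engineering",
--     ],
--     "ML Engineer": [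
--         "Python", "Machine Learning", "Deep Learning", "TensorFlow",
--         "PyTorch", "Docker", "REST APIs", "SQL", "Statistics",
--         "Data Structures & Algorithms",
--     ],
--     "AI Engineer": [
--         "Python", "Deep Learning", "Machine Learning", "TensorFlow",
--         "PyTorch", "Statistics", "Linear Algebra", "REST APIs",
--     ],
--     "Software Engineer": [
--         "Python", "Data Structures & Algorithms", "SQL", "REST APIs",
--         "JavaScript", "System Design", "Git", "Docker",
--     ],
--     "Web Developer": [
--         "HTML", "CSS", "JavaScript", "React", "REST APIs", "Node.js",
--     ],
--     "Full Stack Developer": [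
--         "HTML", "CSS", "JavaScript", "React", "Node.js", "SQL",
--         "REST APIs", "Docker",
--     ],
--     "Java Backend Developer": [
--         "Java", "Spring Boot", "SQL", "REST APIs", "System Design",
--         "Docker", "Microservices",
--     ],
--     "DevOps Engineer": [
--         "Linux", "Docker", "Kubernetes", "CI/CD", "Cloud Platform",
--         "Shell Scripting", "Python",
--     ],
--     "Cloud Engineer": [
--         "Cloud Platform", "Docker", "Kubernetes", "Linux",
--         "Networking", "Terraform", "CI/CD",
--     ],
--     "Cybersecurity Analyst": [
--         "Networking", "Linux", "Python", "Security Tools",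
--         "Cryptography", "SQL",
--     ],
-- }
--
--
-- def _filter_skills_for_role(skills: List[str], target_role: str, required_skills: Optional[List[str]] = None) -> List[str]:
--     """Single stable sort by a 3-tier priority instead of three filtering passes."""
--     role_set = {s.lower() for s in _ROLE_SKILL_MAP.get(target_role, [])}
--     req_set = {s.lower() for s in (required_skills or [])}
--     skill_lower = {s.lower(): s for s in skills}
--
--     def priority(k: str) -> int:
--         if k in role_set:
--             return 0 if k in req_set else 1
--         return 2
--
--     keys = [k for k in skill_lower if k in role_set or k not in req_set]
--     keys.sort(key=priority)
--     return [skill_lower[k] for k in keys]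
-- ===== Notes on version B (the rewrite author's own statement) =====
-- stated objective: alternative
-- what changed: B replaces A's three separate filtering passes over the lowered-skill dict (tier1/tier2/tier3 list comprehensions concatenated) by a single filtered key list stably sorted under a 3-valued priority function, relying on sort stability to keep insertion order within each tier.
import Mathlib
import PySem

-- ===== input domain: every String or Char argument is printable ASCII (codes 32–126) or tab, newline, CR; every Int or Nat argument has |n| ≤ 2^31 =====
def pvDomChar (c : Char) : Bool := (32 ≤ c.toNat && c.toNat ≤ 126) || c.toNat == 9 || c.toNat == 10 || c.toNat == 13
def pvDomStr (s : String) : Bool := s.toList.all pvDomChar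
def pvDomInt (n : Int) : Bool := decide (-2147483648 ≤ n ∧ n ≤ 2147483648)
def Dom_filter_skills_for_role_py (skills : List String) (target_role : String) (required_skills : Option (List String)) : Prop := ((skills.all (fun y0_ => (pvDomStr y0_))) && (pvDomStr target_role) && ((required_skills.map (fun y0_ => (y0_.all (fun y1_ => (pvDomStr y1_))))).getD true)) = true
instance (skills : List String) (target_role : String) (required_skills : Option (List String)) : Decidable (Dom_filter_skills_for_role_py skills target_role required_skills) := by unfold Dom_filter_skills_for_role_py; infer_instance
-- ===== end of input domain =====

-- B replaces A's three separate filtering passes by one stable sort under a 3-valued priority key (objective: alternative, same cost).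

-- ===== PORT A =====
-- module constant _ROLE_SKILL_MAP (shared by both ports, as in the Python module)
def pvRoleSkillMap : PySem.Dict String (List String) :=
  PySem.Dict.ofList [
    ("Data Analyst", ["SQL", "Excel", "Python", "Data Visualization", "Statistics",
                      "Tableau", "Power BI", "Pandas", "NumPy"]),
    ("Data Scientist", ["Python", "Machine Learning", "Statistics", "SQL",
                        "Data Visualization", "Deep Learning", "Scikit-learn",
                        "TensorFlow", "Feature Engineering"]),
    ("ML Engineer", ["Python", "Machine Learning", "Deep Learning", "TensorFlow",
                     "PyTorch", "Docker", "REST APIs", "SQL", "Statistics",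
                     "Data Structures & Algorithms"]),
    ("AI Engineer", ["Python", "Deep Learning", "Machine Learning", "TensorFlow",
                     "PyTorch", "Statistics", "Linear Algebra", "REST APIs"]),
    ("Software Engineer", ["Python", "Data Structures & Algorithms", "SQL", "REST APIs",
                           "JavaScript", "System Design", "Git", "Docker"]),
    ("Web Developer", ["HTML", "CSS", "JavaScript", "React", "REST APIs", "Node.js"]),
    ("Full Stack Developer", ["HTML", "CSS", "JavaScript", "React", "Node.js", "SQL",
                              "REST APIs", "Docker"]),
    ("Java Backend Developer", ["Java", "Spring Boot", "SQL", "REST APIs", "System Design",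
                                "Docker", "Microservices"]),
    ("DevOps Engineer", ["Linux", "Docker", "Kubernetes", "CI/CD", "Cloud Platform",
                         "Shell Scripting", "Python"]),
    ("Cloud Engineer", ["Cloud Platform", "Docker", "Kubernetes", "Linux",
                        "Networking", "Terraform", "CI/CD"]),
    ("Cybersecurity Analyst", ["Networking", "Linux", "Python", "Security Tools",
                               "Cryptography", "SQL"])]

def filter_skills_for_role_py (skills : List String) (target_role : String) (required_skills : Option (List String)) : List String :=
  let role_relevant := pvRoleSkillMap.getD target_role []
  let req_set : PySem.Set String := PySem.Set.ofList ((required_skills.getD []).map PySem.Str.lower)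
  let role_set : PySem.Set String := PySem.Set.ofList (role_relevant.map PySem.Str.lower)
  let skill_lower : PySem.Dict String String :=
    skills.foldl (fun d s => d.insert (PySem.Str.lower s) s) PySem.Dict.empty
  -- skill_lower[k] can never fail here; "" is the unreachable total-lookup default
  let tier1 := (skill_lower.keys.filter (fun k => PySem.Set.contains req_set k && PySem.Set.contains role_set k)).map (fun k => skill_lower.getD k "")
  let tier2 := (skill_lower.keys.filter (fun k => PySem.Set.contains role_set k && !PySem.Set.contains req_set k)).map (fun k => skill_lower.getD k "")
  let tier3 := (skill_lower.keys.filter (fun k => !PySem.Set.contains role_set k && !PySem.Set.contains req_set k)).map (fun k => skill_lower.getD k "")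
  tier1 ++ tier2 ++ tier3

-- ===== PORT B =====
def pvPriority (role_set req_set : PySem.Set String) (k : String) : Int :=
  if PySem.Set.contains role_set k then (if PySem.Set.contains req_set k then 0 else 1) else 2

def filter_skills_for_role_py_alt (skills : List String) (target_role : String) (required_skills : Option (List String)) : List String :=
  let role_set : PySem.Set String := PySem.Set.ofList ((pvRoleSkillMap.getD target_role []).map PySem.Str.lower)
  let req_set : PySem.Set String := PySem.Set.ofList ((required_skills.getD []).map PySem.Str.lower)
  let skill_lower : PySem.Dict String String :=
    skills.foldl (fun d s => d.insert (PySem.Str.lower s) s) PySem.Dict.empty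
  let keys := skill_lower.keys.filter (fun k => PySem.Set.contains role_set k || !PySem.Set.contains req_set k)
  let sortedKeys := PySem.List.sorted keys (pvPriority role_set req_set) false
  sortedKeys.map (fun k => skill_lower.getD k "")

-- ===== PRECONDITION & SPEC =====
def Spec_filter_skills_for_role_py (skills : List String) (target_role : String) (required_skills : Option (List String)) (out : List String) : Prop := out = filter_skills_for_role_py_alt skills target_role required_skills
instance (skills : List String) (target_role : String) (required_skills : Option (List String)) (out : List String) : Decidable (Spec_filter_skills_for_role_py skills target_role required_skills out) := by unfold Spec_filter_skills_for_role_py; infer_instance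

-- ===== CLAIM (what is proved, stated in full; the proofs are below) =====
def Claim_equal_filter_skills_for_role_py : Prop := ∀ (skills : List String) (target_role : String) (required_skills : Option (List String)), Dom_filter_skills_for_role_py skills target_role required_skills → Spec_filter_skills_for_role_py skills target_role required_skills (filter_skills_for_role_py skills target_role required_skills)

-- ===== LEMMAS AND PROOFS =====

-- insertBy drops x exactly after the prefix it does not go before and in front of the suffix it does
lemma insertBy_middle {α : Type} (before : α → α → Bool) (x : α) (A B : List α)
    (hA : ∀ a ∈ A, before x a = false) (hB : ∀ b ∈ B, before x b = true) :
    PySem.List.insertBy before x (A ++ B) = A ++ x :: B := by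
  induction A with
  | nil =>
    cases B with
    | nil => simp [PySem.List.insertBy]
    | cons b B' => simp [PySem.List.insertBy, hB b (by simp)]
  | cons a A' ih =>
    have ha := hA a (by simp)
    simp only [List.cons_append, PySem.List.insertBy, ha]
    simp only [Bool.false_eq_true, if_false, List.cons.injEq, true_and]
    exact ih (fun a' ha' => hA a' (by simp [ha']))

lemma sorted_three_tier {α : Type} (f : α → Int) (xs : List α)
    (hf : ∀ x ∈ xs, f x = 0 ∨ f x = 1 ∨ f x = 2) :
    PySem.List.sorted xs f false =
      xs.filter (fun x => f x == 0) ++ xs.filter (fun x => f x == 1) ++ xs.filter (fun x => f x == 2) := by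
  rw [PySem.List.sorted_eq_foldl_insertBy]
  induction xs using List.reverseRecOn with
  | nil => simp
  | append_singleton l x ih =>
    rw [List.foldl_append, List.foldl_cons, List.foldl_nil,
        ih (fun y hy => hf y (by simp [hy]))]
    have fil0 : ∀ a ∈ l.filter (fun x => f x == 0), f a = 0 := by
      intro a ha; simpa using (List.of_mem_filter ha)
    have fil1 : ∀ a ∈ l.filter (fun x => f x == 1), f a = 1 := by
      intro a ha; simpa using (List.of_mem_filter ha)
    have fil2 : ∀ a ∈ l.filter (fun x => f x == 2), f a = 2 := by
      intro a ha; simpa using (List.of_mem_filter ha)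
    rcases hf x (by simp) with h0 | h1 | h2
    · rw [List.append_assoc,
          insertBy_middle _ x (l.filter (fun x => f x == 0))
            (l.filter (fun x => f x == 1) ++ l.filter (fun x => f x == 2))
            (by intro a ha; simp only [fil0 a ha, h0]; decide)
            (by intro b hb; rcases List.mem_append.1 hb with hb | hb
                · simp only [fil1 b hb, h0]; decide
                · simp only [fil2 b hb, h0]; decide)]
      simp [List.filter_append, h0]
    · rw [show l.filter (fun x => f x == 0) ++ l.filter (fun x => f x == 1) ++ l.filter (fun x => f x == 2)
            = (l.filter (fun x => f x == 0) ++ l.filter (fun x => f x == 1)) ++ l.filter (fun x => f x == 2) from rfl,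
          insertBy_middle _ x (l.filter (fun x => f x == 0) ++ l.filter (fun x => f x == 1))
            (l.filter (fun x => f x == 2))
            (by intro a ha; rcases List.mem_append.1 ha with ha | ha
                · simp only [fil0 a ha, h1]; decide
                · simp only [fil1 a ha, h1]; decide)
            (by intro b hb; simp only [fil2 b hb, h1]; decide)]
      simp [List.filter_append, h1]
    · rw [PySem.List.insertBy_of_forall_not_before _ x _
            (by intro a ha
                rcases List.mem_append.1 ha with ha | ha
                · rcases List.mem_append.1 ha with ha | ha
                  · simp only [fil0 a ha, h2]; decide
                  · simp only [fil1 a ha, h2]; decide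
                · simp only [fil2 a ha, h2]; decide)]
      simp [List.filter_append, h2]

-- pvPriority only takes the values 0,1,2; the three tiers of A are the three priority classes of B
lemma tiers_eq (rs qs : PySem.Set String) (keys : List String) (g : String → String) :
    (keys.filter (fun k => PySem.Set.contains qs k && PySem.Set.contains rs k)).map g
      ++ (keys.filter (fun k => PySem.Set.contains rs k && !PySem.Set.contains qs k)).map g
      ++ (keys.filter (fun k => !PySem.Set.contains rs k && !PySem.Set.contains qs k)).map g
    = (PySem.List.sorted (keys.filter (fun k => PySem.Set.contains rs k || !PySem.Set.contains qs k)) (pvPriority rs qs) false).map g := by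
  rw [sorted_three_tier (pvPriority rs qs) _
        (by intro k _; unfold pvPriority; split_ifs <;> simp)]
  have c0 : (keys.filter (fun k => PySem.Set.contains rs k || !PySem.Set.contains qs k)).filter (fun x => pvPriority rs qs x == 0)
      = keys.filter (fun k => PySem.Set.contains qs k && PySem.Set.contains rs k) := by
    rw [List.filter_filter]
    exact List.filter_congr (by intro k _; unfold pvPriority
                                cases h1 : PySem.Set.contains rs k <;> cases h2 : PySem.Set.contains qs k <;> simp)
  have c1 : (keys.filter (fun k => PySem.Set.contains rs k || !PySem.Set.contains qs k)).filter (fun x => pvPriority rs qs x == 1)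
      = keys.filter (fun k => PySem.Set.contains rs k && !PySem.Set.contains qs k) := by
    rw [List.filter_filter]
    exact List.filter_congr (by intro k _; unfold pvPriority
                                cases h1 : PySem.Set.contains rs k <;> cases h2 : PySem.Set.contains qs k <;> simp)
  have c2 : (keys.filter (fun k => PySem.Set.contains rs k || !PySem.Set.contains qs k)).filter (fun x => pvPriority rs qs x == 2)
      = keys.filter (fun k => !PySem.Set.contains rs k && !PySem.Set.contains qs k) := by
    rw [List.filter_filter]
    exact List.filter_congr (by intro k _; unfold pvPriority
                                cases h1 : PySem.Set.contains rs k <;> cases h2 : PySem.Set.contains qs k <;> simp)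
  rw [c0, c1, c2, List.map_append, List.map_append]

-- ===== VERDICT (by name: the statement is the Claim_ definition above) =====
theorem filter_skills_for_role_py_spec : Claim_equal_filter_skills_for_role_py := by
  intro skills target_role required_skills _
  unfold Spec_filter_skills_for_role_py
  simp only [filter_skills_for_role_py, filter_skills_for_role_py_alt]
  exact tiers_eq _ _ _ _
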